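-- pv_equiv track=rewrite | github.com/lolooften/query | c_ner/NCRFpp/predict_ne.py | recover_entities
-- ===== SOURCE A (Python) =====
-- def recover_entities(raw_texts, pred_results):
--     entities_list = []
--     for (raw_text, pred_result) in zip(raw_texts, pred_results):
--         entities = []
--         entity = ''
--         entity_type = ''
--         for (text, label) in zip(raw_text, pred_result):
--             if label.startswith('B'):
--                 if len(entity) != 0:
--                     entities.append((entity_type, entity))
--                 entity_type = label.split('-')[1]
--                 entity = text
--             elif label.startswith('I'):
--                 if len(entity) != 0:
--                     entity += text
--             elif label.startswith('O'):
--                 if len(entity) != 0: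
--                     entities.append((entity_type, entity))
--                     entity = ''
--                     entity_type = ''
--         if len(entity) != 0:
--             entities.append((entity_type, entity))
--         entities_list.append(entities)
--     return entities_list
-- ===== SOURCE B (Python) =====
-- def recover_entities(raw_texts, pred_results):
--     return [_extract(list(zip(rt, pr))) for rt, pr in zip(raw_texts, pred_results)]
--
--
-- def _extract(pairs):
--     # boundary-detection scan: find each 'B' label, then consume its segment
--     entities = []
--     i, n = 0, len(pairs)
--     while i < n:
--         text, label = pairs[i]
--         i += 1
--         if label.startswith('B'):
--             entity_type = label.split('-')[1]
--             entity = text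
--             while i < n and not (pairs[i][1].startswith('B') or pairs[i][1].startswith('O')):
--                 if pairs[i][1].startswith('I') and entity:
--                     entity += pairs[i][0]
--                 i += 1
--             if entity:
--                 entities.append((entity_type, entity))
--     return entities
-- ===== Notes on version B (the rewrite author's own statement) =====
-- stated objective: alternative
-- what changed: A's single-pass accumulator state machine (carrying entity/entity_type across every label) is replaced by a boundary-detection nested scan: an outer loop finds each 'B' label and an inner loop consumes that entity's segment up to the next B/O boundary; Pre_ excludes inputs where a visited label starts with 'B' but contains no '-', on which both A and B raise IndexError.
import Mathlib
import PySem

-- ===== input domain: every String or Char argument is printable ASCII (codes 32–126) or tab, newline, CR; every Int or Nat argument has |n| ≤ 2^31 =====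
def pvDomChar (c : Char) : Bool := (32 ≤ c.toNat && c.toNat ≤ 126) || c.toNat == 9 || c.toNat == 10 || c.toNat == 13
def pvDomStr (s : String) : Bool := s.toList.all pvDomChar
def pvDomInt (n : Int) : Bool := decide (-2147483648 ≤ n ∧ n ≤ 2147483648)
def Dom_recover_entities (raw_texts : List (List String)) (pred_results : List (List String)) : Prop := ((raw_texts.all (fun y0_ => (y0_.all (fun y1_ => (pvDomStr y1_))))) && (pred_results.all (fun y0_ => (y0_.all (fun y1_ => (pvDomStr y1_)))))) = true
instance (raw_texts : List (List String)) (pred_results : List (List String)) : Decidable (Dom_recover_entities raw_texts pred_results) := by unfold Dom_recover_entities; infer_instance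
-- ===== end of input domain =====

-- B replaces A's flat accumulator state machine by a per-entity boundary-detection scan
-- (find each 'B' label, consume its segment); objective: alternative decomposition, same cost.

-- ===== PORT A =====
def pvStepA (st : List (String × String) × String × String) (tl : String × String) :
    List (String × String) × String × String :=
  let es := st.1; let ent := st.2.1; let ty := st.2.2
  let t := tl.1; let l := tl.2
  if PySem.Str.startswith l "B" then
    let es' := if PySem.Str.len ent != 0 then es ++ [(ty, ent)] else es
    let ty' := (PySem.List.pyGet? ((PySem.Str.split? l "-").getD []) 1).getD ""
    (es', t, ty')
  else if PySem.Str.startswith l "I" then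
    (es, (if PySem.Str.len ent != 0 then ent ++ t else ent), ty)
  else if PySem.Str.startswith l "O" then
    if PySem.Str.len ent != 0 then (es ++ [(ty, ent)], "", "") else (es, ent, ty)
  else (es, ent, ty)

def pvSeqA (rt pr : List String) : List (String × String) :=
  let st := (rt.zip pr).foldl pvStepA ([], "", "")
  if PySem.Str.len st.2.1 != 0 then st.1 ++ [(st.2.2, st.2.1)] else st.1

def recover_entities (raw_texts : List (List String)) (pred_results : List (List String)) : List (List (String × String)) :=
  (raw_texts.zip pred_results).foldl (fun acc p => acc ++ [pvSeqA p.1 p.2]) []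

-- ===== PORT B =====
def pvConsume (ent : String) : List (String × String) → String × List (String × String)
  | [] => (ent, [])
  | (t, l) :: rest =>
    if PySem.Str.startswith l "B" || PySem.Str.startswith l "O" then (ent, (t, l) :: rest)
    else pvConsume (if PySem.Str.startswith l "I" && ent != "" then ent ++ t else ent) rest

-- cited by pvExtract's decreasing_by
theorem pvConsume_len_le (ent : String) (xs : List (String × String)) :
    (pvConsume ent xs).2.length ≤ xs.length := by
  induction xs generalizing ent with
  | nil => simp [pvConsume]
  | cons p rest ih =>
    obtain ⟨t, l⟩ := p
    simp only [pvConsume]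
    split
    · simp
    · exact Nat.le_succ_of_le (ih _)

def pvExtract (acc : List (String × String)) : List (String × String) → List (String × String)
  | [] => acc
  | (t, l) :: rest =>
    if PySem.Str.startswith l "B" then
      let ty := (PySem.List.pyGet? ((PySem.Str.split? l "-").getD []) 1).getD ""
      let r := pvConsume t rest
      pvExtract (if r.1 != "" then acc ++ [(ty, r.1)] else acc) r.2
    else pvExtract acc rest
termination_by xs => xs.length
decreasing_by
  · exact Nat.lt_succ_of_le (pvConsume_len_le t rest)
  · simp

def recover_entities_alt (raw_texts : List (List String)) (pred_results : List (List String)) : List (List (String × String)) :=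
  (raw_texts.zip pred_results).map (fun p => pvExtract [] (p.1.zip p.2))

-- ===== PRECONDITION & SPEC =====
-- Pre_ excludes inputs where some visited label starts with 'B' but contains no '-':
-- there Python A raises IndexError on label.split('-')[1] (and B raises identically).
def Pre_recover_entities (raw_texts : List (List String)) (pred_results : List (List String)) : Prop :=
  ((raw_texts.zip pred_results).all (fun p => (p.1.zip p.2).all (fun q =>
    !(PySem.Str.startswith q.2 "B") || PySem.Str.isIn "-" q.2))) = true
instance (raw_texts : List (List String)) (pred_results : List (List String)) : Decidable (Pre_recover_entities raw_texts pred_results) := by unfold Pre_recover_entities; infer_instance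

def pvWitness_recover_entities : List (List String) × List (List String) :=
  ([["New", "York", "is", "big"]], [["B-LOC", "I-LOC", "O", "O"]])

def Spec_recover_entities (raw_texts : List (List String)) (pred_results : List (List String)) (out : List (List (String × String))) : Prop := out = recover_entities_alt raw_texts pred_results
instance (raw_texts : List (List String)) (pred_results : List (List String)) (out : List (List (String × String))) : Decidable (Spec_recover_entities raw_texts pred_results out) := by unfold Spec_recover_entities; infer_instance

-- ===== CLAIM (what is proved, stated in full; the proofs are below) =====
def Claim_equal_recover_entities : Prop := ∀ (raw_texts : List (List String)) (pred_results : List (List String)), Dom_recover_entities raw_texts pred_results → Pre_recover_entities raw_texts pred_results → Spec_recover_entities raw_texts pred_results (recover_entities raw_texts pred_results)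

-- ===== LEMMAS AND PROOFS =====
-- the final flush of A's inner loop, as a function of the remaining pairs and the state
def pvFinA (es : List (String × String)) (ent ty : String) (xs : List (String × String)) : List (String × String) :=
  let st := xs.foldl pvStepA (es, ent, ty)
  if PySem.Str.len st.2.1 != 0 then st.1 ++ [(st.2.2, st.2.1)] else st.1

-- B's segment continuation from the same state
def pvGB (es : List (String × String)) (ent ty : String) (xs : List (String × String)) : List (String × String) :=
  pvExtract (if (pvConsume ent xs).1 != "" then es ++ [(ty, (pvConsume ent xs).1)] else es) (pvConsume ent xs).2

theorem pvFinA_cons (es : List (String × String)) (ent ty t l : String)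
    (rest : List (String × String)) :
    pvFinA es ent ty ((t, l) :: rest)
      = pvFinA (pvStepA (es, ent, ty) (t, l)).1 (pvStepA (es, ent, ty) (t, l)).2.1
          (pvStepA (es, ent, ty) (t, l)).2.2 rest := rfl

theorem pv_sw_IO (l : String) (h : PySem.Chars.startswith l.toList ['I'] = true) :
    PySem.Chars.startswith l.toList ['O'] = false := by
  rw [PySem.Chars.startswith_iff] at h
  rw [Bool.eq_false_iff]
  intro hc
  rw [PySem.Chars.startswith_iff] at hc
  obtain ⟨u, hu⟩ := h
  obtain ⟨v, hv⟩ := hc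
  rw [← hv] at hu
  simp at hu

theorem pvGB_empty (xs : List (String × String)) (acc : List (String × String)) (ty : String) :
    pvGB acc "" ty xs = pvExtract acc xs := by
  induction xs generalizing acc ty with
  | nil => simp [pvGB, pvConsume, pvExtract]
  | cons p rest ih =>
    obtain ⟨t, l⟩ := p
    by_cases hB : PySem.Chars.startswith l.toList ['B'] = true
    · simp [pvGB, pvConsume, pvExtract, hB]
    · by_cases hO : PySem.Chars.startswith l.toList ['O'] = true
      · simp [pvGB, pvConsume, pvExtract, hB, hO]
      · have h1 : pvGB acc "" ty ((t, l) :: rest) = pvGB acc "" ty rest := by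
          simp [pvGB, pvConsume, hB, hO]
        rw [h1, ih]
        simp [pvExtract, hB]

theorem pv_main (xs : List (String × String)) (es : List (String × String)) (ent ty : String) :
    pvFinA es ent ty xs = pvGB es ent ty xs := by
  induction xs generalizing es ent ty with
  | nil => simp [pvFinA, pvGB, pvConsume, pvExtract]
  | cons p rest ih =>
    obtain ⟨t, l⟩ := p
    by_cases hB : PySem.Chars.startswith l.toList ['B'] = true
    · have hstep : pvStepA (es, ent, ty) (t, l)
          = (if ent = "" then es else es ++ [(ty, ent)], t,
             (PySem.List.pyGet? ((PySem.Str.split? l "-").getD []) 1).getD "") := by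
        simp [pvStepA, hB]
      rw [pvFinA_cons, hstep]
      rw [ih]
      simp [pvGB, pvConsume, pvExtract, hB]
    · by_cases hI : PySem.Chars.startswith l.toList ['I'] = true
      · have hO := pv_sw_IO l hI
        have hstep : pvStepA (es, ent, ty) (t, l)
            = (es, if ent = "" then ent else ent ++ t, ty) := by
          simp [pvStepA, hB, hI]
        rw [pvFinA_cons, hstep]
        rw [ih]
        simp [pvGB, pvConsume, hB, hI, hO]
      · by_cases hO : PySem.Chars.startswith l.toList ['O'] = true
        · by_cases he : ent = ""
          · subst he
            have hstep : pvStepA (es, "", ty) (t, l) = (es, "", ty) := by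
              simp [pvStepA, hB, hI, hO]
            rw [pvFinA_cons, hstep]
            rw [ih, pvGB_empty]
            simp [pvGB, pvConsume, pvExtract, hB, hO]
          · have hstep : pvStepA (es, ent, ty) (t, l) = (es ++ [(ty, ent)], "", "") := by
              simp [pvStepA, hB, hI, hO, he]
            rw [pvFinA_cons, hstep]
            rw [ih, pvGB_empty]
            simp [pvGB, pvConsume, pvExtract, hB, hO, he]
        · have hstep : pvStepA (es, ent, ty) (t, l) = (es, ent, ty) := by
            simp [pvStepA, hB, hI, hO]
          rw [pvFinA_cons, hstep]
          rw [ih]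
          simp [pvGB, pvConsume, hB, hI, hO]

theorem pv_seq (rt pr : List String) : pvSeqA rt pr = pvExtract [] (rt.zip pr) := by
  have h1 : pvSeqA rt pr = pvFinA [] "" "" (rt.zip pr) := rfl
  rw [h1, pv_main, pvGB_empty]

theorem recover_entities_spec : Claim_equal_recover_entities := by
  intro raw_texts pred_results _ _
  unfold Spec_recover_entities recover_entities recover_entities_alt
  rw [PySem.List.foldl_append_singleton_eq_map]
  simp only [List.nil_append]
  exact List.map_congr_left (fun p _ => pv_seq p.1 p.2)
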